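-- pv_equiv track=rewrite | github.com/slyfoxnoname/programming2025 | HomeWorks/HomeWork#17/task#2 (2242)/t17_17(2)_e2242.py | restore_tree
-- ===== SOURCE A (Python) =====
-- class TreeNode:
--     def __init__(self, val):
--         self.val = val
--         self.left = None
--         self.right = None
--
-- def insert_bst(root, val):
--     if root is None:
--         return TreeNode(val)
--     if val < root.val:
--         root.left = insert_bst(root.left, val)
--     else:
--         root.right = insert_bst(root.right, val)
--     return root
--
-- def preorder_traversal(node):
--     if node is None:
--         return ''
--     return node.val + preorder_traversal(node.left) + preorder_traversal(node.right)
--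
-- def restore_tree(lines):
--     # Створення дерева із зворотного порядку
--     nodes = []
--     for line in reversed(lines):
--         for ch in line.strip():
--             nodes.append(ch)
--
--     root = None
--     for node in nodes:
--         root = insert_bst(root, node)
--
--     return preorder_traversal(root)
-- ===== SOURCE B (Python) =====
-- def restore_tree(lines):
--     chars = [ch for line in reversed(lines) for ch in line.strip()]
--
--     def pre(seq):
--         # preorder of the insertion-BST of seq, without building the tree:
--         # root = first element; left subtree = later elements < root (in order),
--         # right subtree = later elements >= root (in order).
--         if not seq:
--             return ''
--         x = seq[0]
--         rest = seq[1:]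
--         return x + pre([c for c in rest if c < x]) + pre([c for c in rest if c >= x])
--
--     return pre(chars)
-- ===== Notes on version B (the rewrite author's own statement) =====
-- stated objective: alternative
-- what changed: B never builds a tree: it computes the preorder directly by a quicksort-style partition recursion (first char is the root, later chars split by < / >=), replacing A's node-by-node BST insertion and traversal.
import Mathlib
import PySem

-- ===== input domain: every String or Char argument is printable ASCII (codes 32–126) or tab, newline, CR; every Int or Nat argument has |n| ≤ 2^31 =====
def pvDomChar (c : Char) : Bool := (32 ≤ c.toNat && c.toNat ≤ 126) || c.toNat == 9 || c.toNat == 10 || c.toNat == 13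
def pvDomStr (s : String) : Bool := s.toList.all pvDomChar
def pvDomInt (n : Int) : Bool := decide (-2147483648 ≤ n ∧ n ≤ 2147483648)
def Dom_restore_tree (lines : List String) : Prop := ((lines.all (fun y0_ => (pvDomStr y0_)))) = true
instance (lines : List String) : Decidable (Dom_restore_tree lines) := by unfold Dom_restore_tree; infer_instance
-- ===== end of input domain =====

-- B replaces A's node-by-node BST build + traversal with a direct partition recursion
-- computing the same preorder string; alternative algorithm, return value only.

-- ===== PORT A =====
inductive PvTree : Type
  | nil : PvTree
  | node : Char → PvTree → PvTree → PvTree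
deriving DecidableEq, Repr

def pvInsertBst : PvTree → Char → PvTree
  | .nil, v => .node v .nil .nil
  | .node x l r, v => if v < x then .node x (pvInsertBst l v) r else .node x l (pvInsertBst r v)

-- node.val + preorder(left) + preorder(right), as a char list (String.mk at the end)
def pvPreorder : PvTree → List Char
  | .nil => []
  | .node x l r => x :: (pvPreorder l ++ pvPreorder r)

def restore_tree (lines : List String) : String :=
  let nodes := lines.reverse.foldl (fun acc line => acc ++ (PySem.Str.strip line).toList) []
  let root := nodes.foldl pvInsertBst .nil
  String.mk (pvPreorder root)

-- ===== PORT B =====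
-- pre(seq): first char is the root; later chars < root form the left part, chars >= root the right part
def pvPre : List Char → List Char
  | [] => []
  | x :: rest =>
      x :: (pvPre (rest.filter (fun c => decide (c < x))) ++
            pvPre (rest.filter (fun c => decide (x ≤ c))))
termination_by seq => seq.length
decreasing_by
  all_goals
    simp only [List.length_unattach]
    exact Nat.lt_succ_of_le (le_trans (List.length_filter_le _ _) (by simp))

def restore_tree_alt (lines : List String) : String :=
  let chars := lines.reverse.flatMap (fun line => (PySem.Str.strip line).toList)
  String.mk (pvPre chars)

-- ===== PRECONDITION & SPEC =====
def Spec_restore_tree (lines : List String) (out : String) : Prop := out = restore_tree_alt lines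
instance (lines : List String) (out : String) : Decidable (Spec_restore_tree lines out) := by unfold Spec_restore_tree; infer_instance

-- ===== CLAIM (what is proved, stated in full; the proofs are below) =====
def Claim_equal_restore_tree : Prop := ∀ (lines : List String), Dom_restore_tree lines → Spec_restore_tree lines (restore_tree lines)

-- ===== LEMMAS AND PROOFS =====

-- inserting a sequence into a nonempty BST inserts the small elements left, the rest right
theorem pv_insert_fold (vs : List Char) : ∀ (x : Char) (l r : PvTree),
    vs.foldl pvInsertBst (.node x l r) =
      .node x ((vs.filter (fun c => decide (c < x))).foldl pvInsertBst l)
              ((vs.filter (fun c => decide (x ≤ c))).foldl pvInsertBst r) := by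
  induction vs with
  | nil => intro x l r; simp
  | cons v vs ih =>
      intro x l r
      by_cases h : v < x
      · have h' : ¬ x ≤ v := not_le.mpr h
        simp [pvInsertBst, h, h', ih]
      · have h' : x ≤ v := not_lt.mp h
        simp [pvInsertBst, h, h', ih]

theorem pv_pre_eq_aux (n : Nat) : ∀ vs : List Char, vs.length ≤ n →
    pvPreorder (vs.foldl pvInsertBst .nil) = pvPre vs := by
  induction n with
  | zero =>
      intro vs h
      have : vs = [] := List.eq_nil_of_length_eq_zero (Nat.le_zero.mp h)
      subst this; simp [pvPreorder, pvPre]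
  | succ n ih =>
      intro vs h
      cases vs with
      | nil => simp [pvPreorder, pvPre]
      | cons x rest =>
          have hr : rest.length ≤ n := Nat.lt_succ_iff.mp h
          rw [List.foldl_cons]
          show pvPreorder (rest.foldl pvInsertBst (.node x .nil .nil)) = _
          rw [pv_insert_fold, pvPre]
          simp only [pvPreorder]
          rw [ih _ (le_trans (List.length_filter_le _ _) hr),
              ih _ (le_trans (List.length_filter_le _ _) hr)]

theorem pv_pre_eq (vs : List Char) : pvPreorder (vs.foldl pvInsertBst .nil) = pvPre vs :=
  pv_pre_eq_aux vs.length vs le_rfl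

theorem pv_chars_eq (lines : List String) :
    lines.reverse.foldl (fun acc line => acc ++ (PySem.Str.strip line).toList) [] =
      lines.reverse.flatMap (fun line => (PySem.Str.strip line).toList) := by
  induction lines.reverse using List.reverseRecOn with
  | nil => simp
  | append_singleton xs x ih => simp [List.foldl_append, ih, List.flatMap]

-- ===== VERDICT (by name: the statement is the Claim_ definition above) =====
theorem restore_tree_spec : Claim_equal_restore_tree := by
  intro lines _
  unfold Spec_restore_tree restore_tree restore_tree_alt
  simp only [pv_chars_eq, pv_pre_eq]
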